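-- pv_equiv track=rewrite | github.com/matthew-bevis/AutoSalesReport | auto_data.py | populate_make
-- ===== SOURCE A (Python) =====
-- def populate_make(records):
--     make, year = None, None
--     # First, look for incident record with make/year
--     for incident_type, m, y in records:
--         if incident_type == "I" and m and y:
--             make, year = m, y
--             break
--
--     results = []
--     for incident_type, m, y in records:
--         if incident_type == "A" and make and year:
--             results.append((make, year))
--     return results
-- ===== SOURCE B (Python) =====
-- def populate_make(records):
--     # Single fused pass: simultaneously remember the first qualifying "I"
--     # record and count the "A" records; replicate at the end.
--     first = None
--     count = 0
--     for t, m, y in records: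
--         if first is None and t == "I" and m and y:
--             first = (m, y)
--         if t == "A":
--             count += 1
--     return [] if first is None else [first] * count
-- ===== Notes on version B (the rewrite author's own statement) =====
-- stated objective: alternative
-- what changed: B makes a single fused pass maintaining an accumulator (first qualifying 'I' pair, count of 'A' records) and replicates the pair at the end, instead of A's two staged loops (find-then-break scan, then a per-element appending loop with the guard re-checked each iteration).
import Mathlib
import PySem

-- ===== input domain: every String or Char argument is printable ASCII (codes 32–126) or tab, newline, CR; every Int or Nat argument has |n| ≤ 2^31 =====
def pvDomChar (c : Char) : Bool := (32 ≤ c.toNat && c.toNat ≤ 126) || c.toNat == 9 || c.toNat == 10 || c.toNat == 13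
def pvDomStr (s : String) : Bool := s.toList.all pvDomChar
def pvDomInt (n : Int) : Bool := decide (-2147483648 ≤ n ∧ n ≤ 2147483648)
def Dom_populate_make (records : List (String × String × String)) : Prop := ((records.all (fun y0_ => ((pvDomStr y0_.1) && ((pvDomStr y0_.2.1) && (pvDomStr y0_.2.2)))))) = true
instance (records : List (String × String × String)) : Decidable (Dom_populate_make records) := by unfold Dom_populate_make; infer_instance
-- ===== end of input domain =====

-- B fuses A's two staged loops into one pass with an accumulator (first "I" pair, "A" count) and replicates at the end; objective: alternative.


-- ===== PORT A =====
-- first loop of A: scan for the first "I" record with truthy make and year, break with (some m, some y)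
def pv_findIY : List (String × String × String) → Option String × Option String
  | [] => (none, none)
  | (t, m, y) :: rest =>
      if t == "I" && !m.isEmpty && !y.isEmpty then (some m, some y) else pv_findIY rest

def populate_make (records : List (String × String × String)) : List (String × String) :=
  let my := pv_findIY records
  records.foldl (fun acc r =>
    match my with
    | (some mk, some yr) =>
        if r.1 == "A" && !mk.isEmpty && !yr.isEmpty then acc ++ [(mk, yr)] else acc
    | _ => acc) []

-- ===== PORT B =====
-- B's single fused loop: state = (first qualifying "I" pair or none, count of "A" records)
def pvB_step (st : Option (String × String) × Nat) (r : String × String × String) :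
    Option (String × String) × Nat :=
  let st1 := if st.1.isNone && (r.1 == "I" && !r.2.1.isEmpty && !r.2.2.isEmpty) then
    (some (r.2.1, r.2.2), st.2) else st
  if r.1 == "A" then (st1.1, st1.2 + 1) else st1

def populate_make_alt (records : List (String × String × String)) : List (String × String) :=
  match records.foldl pvB_step (none, 0) with
  | (none, _) => []
  | (some p, count) => List.replicate count p

-- ===== PRECONDITION & SPEC =====
def Spec_populate_make (records : List (String × String × String)) (out : List (String × String)) : Prop := out = populate_make_alt records
instance (records : List (String × String × String)) (out : List (String × String)) : Decidable (Spec_populate_make records out) := by unfold Spec_populate_make; infer_instance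

-- ===== CLAIM =====
def Claim_equal_populate_make : Prop := ∀ (records : List (String × String × String)), Dom_populate_make records → Spec_populate_make records (populate_make records)

-- ===== LEMMAS AND PROOFS =====

def pvPredI (r : String × String × String) : Bool := r.1 == "I" && !r.2.1.isEmpty && !r.2.2.isEmpty

-- B's fused fold, characterized: first component is find? (mapped), second adds countP
theorem pvB_fold_some (l : List (String × String × String)) (p : String × String) (c : Nat) :
    l.foldl pvB_step (some p, c) = (some p, c + l.countP (fun r => r.1 == "A")) := by
  induction l generalizing c with
  | nil => simp
  | cons hd tl ih =>
    rw [List.foldl_cons, List.countP_cons]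
    have hstep : pvB_step (some p, c) hd =
        (if hd.1 == "A" then (some p, c + 1) else (some p, c)) := by
      simp [pvB_step]
    rw [hstep]
    by_cases hA : (hd.1 == "A") = true
    · rw [if_pos hA, ih]; simp [hA]; omega
    · rw [if_neg hA, ih]; simp [show ¬hd.1 = "A" by simpa using hA]

theorem pvB_fold_none (l : List (String × String × String)) (c : Nat) :
    l.foldl pvB_step (none, c) =
      ((l.find? pvPredI).map (fun r => (r.2.1, r.2.2)),
       c + l.countP (fun r => r.1 == "A")) := by
  induction l generalizing c with
  | nil => simp
  | cons hd tl ih =>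
    rw [List.foldl_cons, List.countP_cons]
    by_cases hI : pvPredI hd = true
    · have : pvB_step (none, c) hd =
        (if hd.1 == "A" then (some (hd.2.1, hd.2.2), c + 1) else (some (hd.2.1, hd.2.2), c)) := by
        simp only [pvB_step, Option.isNone_none, Bool.true_and]
        simp only [pvPredI] at hI
        rw [if_pos hI]
      rw [this, List.find?_cons_of_pos hI]
      by_cases hA : (hd.1 == "A") = true
      · rw [if_pos hA, pvB_fold_some]; simp [hA]; try omega
      · rw [if_neg hA, pvB_fold_some]; simp [hA]
    · have : pvB_step (none, c) hd =
        (if hd.1 == "A" then ((none : Option (String × String)), c + 1) else (none, c)) := by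
        simp only [pvB_step, Option.isNone_none, Bool.true_and]
        simp only [pvPredI] at hI
        rw [if_neg hI]
      rw [this, List.find?_cons_of_neg (by simpa using hI)]
      by_cases hA : (hd.1 == "A") = true
      · rw [if_pos hA, ih]; simp [hA]; try omega
      · rw [if_neg hA, ih]; simp [show ¬hd.1 = "A" by simpa using hA]

-- A's first loop agrees with find?
theorem pv_findIY_eq (l : List (String × String × String)) :
    pv_findIY l = match l.find? pvPredI with
      | none => (none, none)
      | some r => (some r.2.1, some r.2.2) := by
  induction l with
  | nil => rfl
  | cons hd tl ih =>
    obtain ⟨t, m, y⟩ := hd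
    by_cases h : (t == "I" && !m.isEmpty && !y.isEmpty) = true
    · simp [pv_findIY, List.find?, pvPredI, h]
    · simp [pv_findIY, List.find?, pvPredI, h, ih]

-- A's second (appending) loop is replicate-by-count
theorem pv_foldl_rep (mk yr : String) (l : List (String × String × String))
    (acc : List (String × String)) :
    l.foldl (fun acc r => if r.1 == "A" && !mk.isEmpty && !yr.isEmpty then acc ++ [(mk, yr)] else acc) acc
      = acc ++ (if (!mk.isEmpty && !yr.isEmpty) = true then
          List.replicate (l.countP (fun r => r.1 == "A")) (mk, yr) else []) := by
  induction l generalizing acc with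
  | nil => simp
  | cons hd tl ih =>
    rw [List.foldl_cons]
    by_cases hA : (hd.1 == "A") = true <;> by_cases hne : (!mk.isEmpty && !yr.isEmpty) = true
    · have hc : (hd.1 == "A" && !mk.isEmpty && !yr.isEmpty) = true := by
        rw [Bool.and_eq_true] at hne ⊢; rw [Bool.and_eq_true]
        exact ⟨⟨hA, hne.1⟩, hne.2⟩
      rw [hc, if_pos rfl, ih, if_pos hne, if_pos hne, List.countP_cons, if_pos hA,
        List.replicate_succ']
      rw [List.append_assoc]
      congr 1
      rw [List.singleton_append, ← List.replicate_succ, List.replicate_succ']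
    · have hc : (hd.1 == "A" && !mk.isEmpty && !yr.isEmpty) = true → False := by
        intro h; rw [Bool.and_eq_true, Bool.and_eq_true] at h
        exact hne (by rw [Bool.and_eq_true]; exact ⟨h.1.2, h.2⟩)
      rw [if_neg hc, ih, if_neg hne, if_neg hne]
    · have hc : (hd.1 == "A" && !mk.isEmpty && !yr.isEmpty) = true → False := by
        intro h; rw [Bool.and_eq_true, Bool.and_eq_true] at h; exact hA h.1.1
      rw [if_neg hc, ih, if_pos hne, if_pos hne, List.countP_cons, if_neg hA, Nat.add_zero]
    · have hc : (hd.1 == "A" && !mk.isEmpty && !yr.isEmpty) = true → False := by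
        intro h; rw [Bool.and_eq_true, Bool.and_eq_true] at h; exact hA h.1.1
      rw [if_neg hc, ih, if_neg hne, if_neg hne]

theorem pv_foldl_none2 (l : List (String × String × String)) (acc : List (String × String)) :
    l.foldl (fun (acc : List (String × String)) (_ : String × String × String) => acc) acc = acc := by
  induction l generalizing acc with
  | nil => rfl
  | cons hd tl ih => exact ih acc

-- ===== VERDICT =====
theorem populate_make_spec : Claim_equal_populate_make := by
  intro records _
  unfold Spec_populate_make populate_make populate_make_alt
  rw [pv_findIY_eq, pvB_fold_none]
  cases hf : records.find? pvPredI with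
  | none =>
    simp only [Option.map_none]
    exact pv_foldl_none2 records []
  | some first =>
    have hp := List.find?_some hf
    obtain ⟨t, m, y⟩ := first
    have hm : (!m.isEmpty && !y.isEmpty) = true := by
      simp only [pvPredI, Bool.and_eq_true] at hp
      simp [hp.1.2, hp.2]
    simp only [Option.map_some]
    rw [pv_foldl_rep m y records []]
    simp [hm]
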